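-- pv_equiv track=rewrite | github.com/pypi-data/pypi-mirror-398 | packages/volta-framework/volta_framework-0.1.2-py3-none-any.whl/volta/security.py | escape_url
-- ===== SOURCE A (Python) =====
-- def escape_url(url: str) -> str:
--     """
--     Sanitize URLs to prevent javascript: and data: attacks.
--     """
--     if url is None:
--         return ''
--
--     url = str(url).strip()
--     url_lower = url.lower()
--
--     # Block dangerous URL schemes
--     dangerous_schemes = ['javascript:', 'data:', 'vbscript:', 'file:']
--     for scheme in dangerous_schemes:
--         if url_lower.startswith(scheme):
--             return '#blocked'
--
--     return url
-- ===== SOURCE B (Python) =====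
-- def escape_url(url: str) -> str:
--     """
--     Sanitize URLs to prevent javascript: and data: attacks.
--     """
--     if url is None:
--         return ''
--
--     url = str(url).strip()
--     url_lower = url.lower()
--
--     # Parse the scheme token once, then a single set lookup.
--     scheme, sep, _ = url_lower.partition(':')
--     if sep and scheme in {'javascript', 'data', 'vbscript', 'file'}:
--         return '#blocked'
--     return url
-- ===== Notes on version B (the rewrite author's own statement) =====
-- stated objective: idiomatic
-- what changed: Replaces the loop over four dangerous prefixes with startswith by parsing the scheme token once via partition(':') and a single set membership test.
import Mathlib
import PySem

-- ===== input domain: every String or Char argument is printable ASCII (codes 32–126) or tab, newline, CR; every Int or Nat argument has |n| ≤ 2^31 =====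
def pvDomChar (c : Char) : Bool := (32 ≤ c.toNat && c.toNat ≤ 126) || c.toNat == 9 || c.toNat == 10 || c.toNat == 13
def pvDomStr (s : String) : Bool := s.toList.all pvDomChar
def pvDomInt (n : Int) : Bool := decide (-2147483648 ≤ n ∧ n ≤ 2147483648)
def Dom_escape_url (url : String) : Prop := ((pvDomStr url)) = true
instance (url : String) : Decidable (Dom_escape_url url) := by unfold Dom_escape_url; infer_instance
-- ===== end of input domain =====

-- B replaces A's loop over four dangerous prefixes with a single parse of the scheme
-- token (partition at the first ':') followed by one set-membership test (idiomatic).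

-- ===== PORT A =====
def escape_url (url : String) : String :=
  let url' := PySem.Str.strip url
  let url_lower := PySem.Str.lower url'
  let dangerous_schemes := ["javascript:", "data:", "vbscript:", "file:"]
  if dangerous_schemes.any (fun scheme => PySem.Str.startswith url_lower scheme) then
    "#blocked"
  else
    url'

-- ===== PORT B =====
def escape_url_alt (url : String) : String :=
  let url' := PySem.Str.strip url
  let cs := PySem.Chars.lower url'.toList
  -- url_lower.partition(':'): scheme = chars before the first ':'; sep nonempty iff ':' occurs
  let scheme := cs.takeWhile (fun c => !(c == ':'))
  let sep := cs.contains ':'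
  if sep && (scheme == "javascript".toList || scheme == "data".toList ||
             scheme == "vbscript".toList || scheme == "file".toList) then
    "#blocked"
  else
    url'

-- ===== PRECONDITION & SPEC =====
def Spec_escape_url (url : String) (out : String) : Prop := out = escape_url_alt url
instance (url : String) (out : String) : Decidable (Spec_escape_url url out) := by unfold Spec_escape_url; infer_instance

-- ===== CLAIM (what is proved, stated in full; the proofs are below) =====
def Claim_equal_escape_url : Prop := ∀ (url : String), Dom_escape_url url → Spec_escape_url url (escape_url url)

-- ===== LEMMAS AND PROOFS =====

-- cs starts with p ++ ":" (with ':' not in p) iff ':' occurs in cs and the chars before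
-- the first ':' are exactly p — the bridge between A's prefix tests and B's parsed scheme.
lemma prefix_colon_iff (p : List Char) (cs : List Char) (hp : ':' ∉ p) :
    (p ++ [':']) <+: cs ↔ ':' ∈ cs ∧ cs.takeWhile (fun c => !(c == ':')) = p := by
  induction p generalizing cs with
  | nil =>
    cases cs with
    | nil => simp
    | cons c t =>
      by_cases h : c = ':'
      · subst h; simp
      · have hb : (c == ':') = false := by simp [h]
        simp [hb, List.cons_prefix_iff, Ne.symm h, h]
  | cons a p' ih =>
    have ha : a ≠ ':' := fun h => hp (h ▸ List.mem_cons_self)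
    cases cs with
    | nil => simp
    | cons c t =>
      by_cases h : c = ':'
      · subst h
        simp [List.cons_prefix_iff, Ne.symm ha]
      · have hb : (c == ':') = false := by simp [h]
        simp [hb, List.cons_prefix_iff,
          ih t (fun hm => hp (List.mem_cons_of_mem _ hm)), Ne.symm h]
        tauto

lemma startswith_colon_eq (p : List Char) (cs : List Char) (hp : ':' ∉ p) :
    PySem.Chars.startswith cs (p ++ [':'])
      = (cs.contains ':' && (cs.takeWhile (fun c => !(c == ':')) == p)) := by
  rw [Bool.eq_iff_iff, PySem.Chars.startswith_iff, prefix_colon_iff p cs hp]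
  simp

-- ===== VERDICT (by name: the statement is the Claim_ definition above) =====
theorem escape_url_spec : Claim_equal_escape_url := by
  intro url _
  unfold Spec_escape_url escape_url escape_url_alt
  simp only [List.any_cons, List.any_nil, Bool.or_false, PySem.Str.startswith_eq,
    PySem.Str.toList_lower]
  have e1 : "javascript:".toList = "javascript".toList ++ [':'] := by decide
  have e2 : "data:".toList = "data".toList ++ [':'] := by decide
  have e3 : "vbscript:".toList = "vbscript".toList ++ [':'] := by decide
  have e4 : "file:".toList = "file".toList ++ [':'] := by decide
  rw [e1, e2, e3, e4]
  set cs := PySem.Chars.lower (PySem.Str.strip url).toList with hcs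
  rw [startswith_colon_eq _ cs (by decide), startswith_colon_eq _ cs (by decide),
      startswith_colon_eq _ cs (by decide), startswith_colon_eq _ cs (by decide)]
  cases hc : cs.contains ':' <;> simp [Bool.and_or_distrib_left, or_assoc]
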